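-- pv_equiv track=rewrite | github.com/sunildeesu/Shorting | vwap_combined_filters.py | get_approach_candle_count
-- ===== SOURCE A (Python) =====
-- from typing import Dict, List, Optional, Tuple
--
-- APPROACH_MIN             = 3     # skip if consecutive approach candles < 3
--
-- def get_approach_candle_count(candles_so_far: List[Dict], direction: str) -> int:
--     """Count consecutive candles approaching VWAP just before the touch."""
--     if len(candles_so_far) < 2:
--         return APPROACH_MIN + 1  # not enough data → allow
--     prices = [c['price'] for c in candles_so_far]
--     count  = 0
--     if direction == "LONG":
--         for i in range(len(prices) - 1, 0, -1):
--             if prices[i] < prices[i - 1]: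
--                 count += 1
--             else:
--                 break
--     else:
--         for i in range(len(prices) - 1, 0, -1):
--             if prices[i] > prices[i - 1]:
--                 count += 1
--             else:
--                 break
--     return count
-- ===== SOURCE B (Python) =====
-- APPROACH_MIN = 3  # skip if consecutive approach candles < 3
--
-- def get_approach_candle_count(candles_so_far, direction):
--     """Count consecutive candles approaching VWAP just before the touch.
--
--     Single forward pass over adjacent pairs with a counter that resets on a
--     non-approaching pair; the final counter is the trailing run length.
--     """
--     if len(candles_so_far) < 2:
--         return APPROACH_MIN + 1  # not enough data -> allow
--     prices = [c['price'] for c in candles_so_far]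
--     long_side = direction == "LONG"
--     run = 0
--     for prev, cur in zip(prices, prices[1:]):
--         approaching = cur < prev if long_side else cur > prev
--         run = run + 1 if approaching else 0
--     return run
-- ===== Notes on version B (the rewrite author's own statement) =====
-- stated objective: alternative
-- what changed: Replaces the two backward index loops with early break by a single forward pass over zipped adjacent pairs maintaining a run counter that resets to 0 on a non-approaching pair.
import Mathlib
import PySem

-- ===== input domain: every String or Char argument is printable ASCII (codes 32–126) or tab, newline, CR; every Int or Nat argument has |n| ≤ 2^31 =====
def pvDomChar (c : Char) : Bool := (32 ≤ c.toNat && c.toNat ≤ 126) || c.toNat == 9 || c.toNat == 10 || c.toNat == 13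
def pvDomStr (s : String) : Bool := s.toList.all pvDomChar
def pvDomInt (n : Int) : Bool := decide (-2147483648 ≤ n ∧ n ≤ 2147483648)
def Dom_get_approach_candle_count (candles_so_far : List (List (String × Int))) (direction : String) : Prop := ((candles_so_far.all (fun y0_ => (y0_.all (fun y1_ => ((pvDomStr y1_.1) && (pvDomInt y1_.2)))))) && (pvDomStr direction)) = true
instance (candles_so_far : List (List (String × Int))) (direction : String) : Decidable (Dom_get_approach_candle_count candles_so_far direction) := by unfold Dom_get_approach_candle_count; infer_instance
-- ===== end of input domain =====

-- B replaces A's backward scan-with-break by a forward pass over adjacent pairs with a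
-- reset-on-failure run counter (alternative decomposition of the same trailing-run count).


-- ===== PORT A =====
-- c['price'] : first match in the association list; under Pre_ the key is present,
-- so the getD 0 default is never the returned value (Python raises KeyError exactly
-- on the inputs Pre_ excludes).
def pvPricesA (candles : List (List (String × Int))) : List Int :=
  candles.map (fun c => (c.lookup "price").getD 0)

-- the backward 'for i in range(n-1, 0, -1)' loop with break; indices j, j+1 are
-- always in range on the calls made, so getD 0 is exact.
def pvALoop (prices : List Int) (lt : Bool) : Nat → Int → Int
  | 0, count => count
  | Nat.succ j, count =>
    if (if lt then prices.getD (j + 1) 0 < prices.getD j 0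
        else prices.getD (j + 1) 0 > prices.getD j 0) then
      pvALoop prices lt j (count + 1)
    else count

def get_approach_candle_count (candles_so_far : List (List (String × Int))) (direction : String) : Int :=
  if candles_so_far.length < 2 then 3 + 1  -- APPROACH_MIN + 1
  else
    let prices := pvPricesA candles_so_far
    if direction == "LONG" then pvALoop prices true (prices.length - 1) 0
    else pvALoop prices false (prices.length - 1) 0

-- ===== PORT B =====
def pvStep (lt : Bool) (run : Int) (pq : Int × Int) : Int :=
  if (if lt then pq.2 < pq.1 else pq.2 > pq.1) then run + 1 else 0

def get_approach_candle_count_alt (candles_so_far : List (List (String × Int))) (direction : String) : Int :=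
  if candles_so_far.length < 2 then 3 + 1  -- APPROACH_MIN + 1
  else
    -- c['price'] as in A: first match, key present under Pre_
    let prices := candles_so_far.map (fun c => (c.lookup "price").getD 0)
    (prices.zip prices.tail).foldl (pvStep (direction == "LONG")) 0

-- ===== PRECONDITION & SPEC =====
-- Pre_ excludes exactly the inputs where Python A raises KeyError: at least 2 candles
-- and some candle without a 'price' key (B raises there too).
def Pre_get_approach_candle_count (candles_so_far : List (List (String × Int))) (direction : String) : Prop :=
  candles_so_far.length < 2 ∨ ∀ c ∈ candles_so_far, (c.lookup "price").isSome
instance (candles_so_far : List (List (String × Int))) (direction : String) : Decidable (Pre_get_approach_candle_count candles_so_far direction) := by unfold Pre_get_approach_candle_count; infer_instance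

def pvWitness_get_approach_candle_count : (List (List (String × Int))) × String :=
  ([[("price", 3)], [("price", 2)], [("price", 1)]], "LONG")

def Spec_get_approach_candle_count (candles_so_far : List (List (String × Int))) (direction : String) (out : Int) : Prop := out = get_approach_candle_count_alt candles_so_far direction
instance (candles_so_far : List (List (String × Int))) (direction : String) (out : Int) : Decidable (Spec_get_approach_candle_count candles_so_far direction out) := by unfold Spec_get_approach_candle_count; infer_instance

-- ===== CLAIM (what is proved, stated in full; the proofs are below) =====
def Claim_equal_get_approach_candle_count : Prop := ∀ (candles_so_far : List (List (String × Int))) (direction : String), Dom_get_approach_candle_count candles_so_far direction → Pre_get_approach_candle_count candles_so_far direction → Spec_get_approach_candle_count candles_so_far direction (get_approach_candle_count candles_so_far direction)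

-- ===== LEMMAS AND PROOFS =====

-- whether an adjacent pair (prev, cur) is 'approaching'
def pvOk (lt : Bool) (s : Int × Int) : Bool :=
  if lt then decide (s.2 < s.1) else decide (s.2 > s.1)

-- length of the leading run of approaching pairs (applied to a reversed list:
-- the trailing run counted by A's backward loop)
def pvBack (lt : Bool) : List (Int × Int) → Int
  | [] => 0
  | s :: rest => if pvOk lt s then 1 + pvBack lt rest else 0

theorem pvStep_eq (lt : Bool) (run : Int) (pq : Int × Int) :
    pvStep lt run pq = if pvOk lt pq then run + 1 else 0 := by
  cases lt <;> simp [pvStep, pvOk] <;> split <;> simp_all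

theorem pvALoop_if (prices : List Int) (lt : Bool) (j : Nat) (count : Int) :
    pvALoop prices lt (j + 1) count =
      if pvOk lt (prices.getD j 0, prices.getD (j + 1) 0) then
        pvALoop prices lt j (count + 1)
      else count := by
  cases lt <;> simp [pvALoop, pvOk] <;> split <;> simp_all

-- B-side: the fold with reset computes the trailing run (via pvBack on the reverse)
theorem foldl_pvStep (lt : Bool) (l : List (Int × Int)) (c : Int) :
    l.foldl (pvStep lt) c =
      if l.all (pvOk lt) then c + l.length else pvBack lt l.reverse := by
  induction l using List.reverseRecOn generalizing c with
  | nil => simp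
  | append_singleton l s ih =>
    rw [List.foldl_append]
    simp only [List.foldl, pvStep_eq]
    by_cases hs : pvOk lt s
    · rw [if_pos hs, ih]
      by_cases hl : l.all (pvOk lt)
      · simp [hl, hs]
        omega
      · simp [List.all_append, hl, hs, pvBack]
        omega
    · simp [List.all_append, hs, pvBack]

theorem pvBack_all (lt : Bool) (l : List (Int × Int)) (h : l.all (pvOk lt)) :
    pvBack lt l = l.length := by
  induction l with
  | nil => simp [pvBack]
  | cons s rest ih =>
    simp only [List.all_cons, Bool.and_eq_true] at h
    simp [pvBack, h.1, ih h.2]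
    omega

-- A-side: the backward loop equals pvBack on the reversed prefix of adjacent pairs
theorem pvALoop_eq (prices : List Int) (lt : Bool) (i : Nat) (c : Int)
    (h : i ≤ prices.length - 1) :
    pvALoop prices lt i c =
      c + pvBack lt (((prices.zip prices.tail).take i).reverse) := by
  induction i generalizing c with
  | zero => simp [pvALoop, pvBack]
  | succ j ih =>
    have hlen : (prices.zip prices.tail).length = prices.length - 1 := by
      simp [List.length_zip]
    have hj : j < (prices.zip prices.tail).length := by omega
    have hj1 : j + 1 ≤ prices.length - 1 := h
    have hjp : j < prices.length := by omega
    have hjp1 : j + 1 < prices.length := by omega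
    have hget : (prices.zip prices.tail)[j] = (prices.getD j 0, prices.getD (j + 1) 0) := by
      have ht : j < prices.tail.length := by simp; omega
      simp [List.getElem_zip, List.getElem_tail, List.getD_eq_getElem?_getD,
        List.getElem?_eq_getElem, hjp, hjp1]
    rw [List.take_succ, List.getElem?_eq_getElem hj, pvALoop_if]
    simp only [Option.toList, List.reverse_append, List.reverse_cons, List.reverse_nil,
      List.nil_append, List.cons_append, hget]
    rw [pvBack]
    by_cases hp : pvOk lt (prices.getD j 0, prices.getD (j + 1) 0)
    · rw [if_pos hp, if_pos hp, ih (c + 1) (by omega)]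
      omega
    · rw [if_neg hp, if_neg hp]
      omega

theorem main_eq (prices : List Int) (lt : Bool) (h : 1 ≤ prices.length) :
    pvALoop prices lt (prices.length - 1) 0 =
      (prices.zip prices.tail).foldl (pvStep lt) 0 := by
  have hlen : (prices.zip prices.tail).length = prices.length - 1 := by
    simp [List.length_zip]
  rw [foldl_pvStep, pvALoop_eq prices lt (prices.length - 1) 0 (le_refl _)]
  rw [← hlen, List.take_length]
  by_cases hall : (prices.zip prices.tail).all (pvOk lt)
  · rw [if_pos hall, pvBack_all lt _ (by simpa using hall)]
    simp [hlen]
  · rw [if_neg hall]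
    omega

-- ===== VERDICT (by name: the statement is the Claim_ definition above) =====
theorem get_approach_candle_count_spec : Claim_equal_get_approach_candle_count := by
  intro candles direction _ _
  unfold Spec_get_approach_candle_count
  unfold get_approach_candle_count get_approach_candle_count_alt pvPricesA
  by_cases hlen : candles.length < 2
  · simp [hlen]
  · have h1 : 1 ≤ (candles.map (fun c => (c.lookup "price").getD 0)).length := by
      simp; omega
    simp only [if_neg hlen]
    by_cases hd : direction == "LONG" <;>
      simp only [hd, if_pos, if_neg, Bool.false_eq_true, ite_true, ite_false] <;>
      rw [main_eq _ _ h1]
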